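/- GENERATED by farm/mkstatement.py from design/units.tsv (unit `compute_codewords.3`) and the assertions of Vorbis/Spec/Codebook/Codewords.lean — do not edit.
   THE STATEMENT of the proof unit `compute_codewords.3`: segment 3 of `compute_codewords` (8 instructions; entries 0x108257;
   exits 0x10827c; ranges 0x108257-0x108277)
   takes each of its entry assertions to one of its exit assertions (`Vorbis.Spec.compute_codewords.Seg3`), given the contracts of its callees.
   What the names mean: Vorbis/Spec/Basic.lean (the shared hypotheses), Vorbis/Spec/Codebook/Codewords.lean (the assertions). The theorem to prove:
   `theorem compute_codewords_3_ok : Vorbis.Spec.compute_codewords_3.Statement`. -/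
import Vorbis.Spec.Codebook
import Vorbis.Spec.Codebook.Codewords
namespace Vorbis.Spec.compute_codewords_3
open X86 X86.User Asan

/-- The statement of unit `compute_codewords.3`. -/
def Statement : Prop :=
  ∀ (Lay : Layout) (_hLay : Lay.hi = 0x1000000) (μ : Microarch) (_hμ : UserX.MicroOK μ) (u₀ : State)
    (_hcode : HasCodeNat Lay u₀ Vorbis.L.compute_codewords.entry Vorbis.Code.code_compute_codewords.nat Vorbis.L.compute_codewords.size)
    (_h_asan_load1_noabort : Asan.SmallCheck Lay μ Vorbis.WayInv (Vorbis.CodeOK u₀) [.rax, .rdx] 1 Vorbis.L.__asan_load1_noabort.entry)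
    (_h_add_entry : ∀ (others : List Obj) (frames : List (Nat × FrameLayout)), Calls Lay μ Vorbis.WayInv (Vorbis.conv u₀) Vorbis.L.add_entry.entry (Vorbis.Spec.add_entry.spec others frames)),
    Vorbis.Spec.compute_codewords.Seg3 Lay μ u₀

end Vorbis.Spec.compute_codewords_3
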